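-- pv_equiv track=rewrite | github.com/gigyesik/baekjoon_python | 08_basic_mathematics_1/10250.py | acm
-- ===== SOURCE A (Python) =====
-- def acm(where: list) -> int:
--     h = where[0]
--     w = where[1]
--     n = where[2]
--     floor = 1
--     room = 1
--
--     while True:
--         if h < n:
--             n -= h
--             floor = n % h
--             room += 1
--         else:
--             floor = n
--             if room < 10:
--                 return int(str(floor)+'0'+str(room))
--             else:
--                 return int(str(floor) + str(room))
-- ===== SOURCE B (Python) =====
-- def acm(where: list) -> int:
--     h = where[0]
--     w = where[1]
--     n = where[2]
--     if n <= h: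
--         floor, room = n, 1
--     else:
--         room = (n - 1) // h + 1
--         floor = n - (room - 1) * h
--     if room < 10:
--         return int(str(floor) + '0' + str(room))
--     return int(str(floor) + str(room))
-- ===== Notes on version B (the rewrite author's own statement) =====
-- stated objective: alternative
-- what changed: Replaced the subtract-h-until-n<=h while loop by a closed-form floor-division computation of room=(n-1)//h+1 and floor=n-(room-1)*h.
import Mathlib
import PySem

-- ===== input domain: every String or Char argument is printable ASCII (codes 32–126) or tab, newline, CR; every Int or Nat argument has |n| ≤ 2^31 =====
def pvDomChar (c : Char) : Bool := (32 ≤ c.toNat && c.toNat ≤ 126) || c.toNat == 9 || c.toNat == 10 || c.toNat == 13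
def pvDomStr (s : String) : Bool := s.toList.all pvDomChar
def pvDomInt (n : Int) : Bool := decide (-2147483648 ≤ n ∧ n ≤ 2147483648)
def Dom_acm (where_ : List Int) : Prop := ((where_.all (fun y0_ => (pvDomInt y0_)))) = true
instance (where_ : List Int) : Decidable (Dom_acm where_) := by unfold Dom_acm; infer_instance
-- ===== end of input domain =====

-- B replaces A's subtract-until-small while loop by a closed-form floor-division formula.

-- ===== PORT A =====
-- the common return expression of A: int(str(floor)+'0'+str(room)) / int(str(floor)+str(room))
def acmOut (floor room : Int) : Int :=
  if room < 10 then (PySem.Int.ofStr? (PySem.Int.toStr floor ++ "0" ++ PySem.Int.toStr room)).getD 0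
  else (PySem.Int.ofStr? (PySem.Int.toStr floor ++ PySem.Int.toStr room)).getD 0

-- A's while loop; when h < n and h ≤ 0 the Python loops forever (excluded by Pre_acm), port returns 0 there
def acmLoop (h n room : Int) : Int :=
  if _hlt : h < n then
    if _hpos : 0 < h then acmLoop h (n - h) (room + 1)
    else 0
  else acmOut n room
termination_by (n - h).toNat
decreasing_by omega

def acm (where_ : List Int) : Int :=
  match PySem.List.pyGet? where_ 0, PySem.List.pyGet? where_ 1, PySem.List.pyGet? where_ 2 with
  | some h, some _w, some n => acmLoop h n 1
  | _, _, _ => 0   -- IndexError in Python; excluded by Pre_acm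

-- ===== PORT B =====
def acmAltOut (floor room : Int) : Int :=
  if room < 10 then (PySem.Int.ofStr? (PySem.Int.toStr floor ++ "0" ++ PySem.Int.toStr room)).getD 0
  else (PySem.Int.ofStr? (PySem.Int.toStr floor ++ PySem.Int.toStr room)).getD 0

def acm_alt (where_ : List Int) : Int :=
  match PySem.List.pyGet? where_ 0 with
  | none => 0
  | some h =>
    match PySem.List.pyGet? where_ 1 with
    | none => 0
    | some _w =>
      match PySem.List.pyGet? where_ 2 with
      | none => 0
      | some n =>
        if n ≤ h then acmAltOut n 1
        else
          let room := PySem.Int.floordiv (n - 1) h + 1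
          acmAltOut (n - (room - 1) * h) room

-- ===== PRECONDITION & SPEC =====
-- Pre_ excludes lists with fewer than 3 elements (A raises IndexError) and inputs with h ≤ 0 < n - h
-- (then A's while loop never terminates).
def Pre_acm (where_ : List Int) : Prop :=
  3 ≤ where_.length ∧
    (PySem.List.pyGetD where_ 2 0 ≤ PySem.List.pyGetD where_ 0 0 ∨ 0 < PySem.List.pyGetD where_ 0 0)
instance (where_ : List Int) : Decidable (Pre_acm where_) := by unfold Pre_acm; infer_instance

def pvWitness_acm : List Int := ([3, 5, 7] : List Int)

def Spec_acm (where_ : List Int) (out : Int) : Prop := out = acm_alt where_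
instance (where_ : List Int) (out : Int) : Decidable (Spec_acm where_ out) := by unfold Spec_acm; infer_instance

-- ===== CLAIM (what is proved, stated in full; the proofs are below) =====
def Claim_equal_acm : Prop := ∀ (where_ : List Int), Dom_acm where_ → Pre_acm where_ → Spec_acm where_ (acm where_)

-- ===== LEMMAS AND PROOFS =====

theorem acm_loop_closed (h : Int) (hh : 0 < h) :
    ∀ (m : Nat) (n room : Int), (n - h).toNat ≤ m → h < n →
      acmLoop h n room =
        acmOut (n - (PySem.Int.floordiv (n - 1) h) * h) (room + PySem.Int.floordiv (n - 1) h) := by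
  intro m
  induction m with
  | zero => intro n room hm hn; omega
  | succ m ih =>
    intro n room hm hn
    rw [acmLoop]
    simp only [dif_pos hn, dif_pos hh]
    by_cases h2 : h < n - h
    · rw [ih (n - h) (room + 1) (by omega) h2]
      set q := PySem.Int.floordiv (n - 1) h with hqdef
      have hb : q * h ≤ n - 1 ∧ n - 1 < (q + 1) * h :=
        (PySem.Int.floordiv_eq_iff_of_pos hh).mp hqdef.symm
      have hq' : PySem.Int.floordiv (n - h - 1) h = q - 1 := by
        rw [PySem.Int.floordiv_eq_iff_of_pos hh]
        constructor <;> nlinarith [hb.1, hb.2]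
      rw [hq']
      have e1 : n - h - (q - 1) * h = n - q * h := by ring
      have e2 : room + 1 + (q - 1) = room + q := by ring
      rw [e1, e2]
    · rw [acmLoop]
      simp only [dif_neg h2]
      have hq : PySem.Int.floordiv (n - 1) h = 1 := by
        rw [PySem.Int.floordiv_eq_iff_of_pos hh]
        constructor <;> omega
      rw [hq]
      have e1 : n - 1 * h = n - h := by ring
      rw [e1]

theorem acm_spec : Claim_equal_acm := by
  intro where_ _hdom hpre
  unfold Spec_acm
  obtain ⟨hlen, hcond⟩ := hpre
  match where_, hlen with
  | h :: w :: n :: rest, _ =>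
    have hget0 : PySem.List.pyGet? (h :: w :: n :: rest) 0 = some h := by
      simp [PySem.List.pyGet?, PySem.List.pyIdx?]; rw [if_pos (by omega)]; simp
    have hget1 : PySem.List.pyGet? (h :: w :: n :: rest) 1 = some w := by
      simp [PySem.List.pyGet?, PySem.List.pyIdx?]; rw [if_pos (by omega)]; simp
    have hget2 : PySem.List.pyGet? (h :: w :: n :: rest) 2 = some n := by
      simp [PySem.List.pyGet?, PySem.List.pyIdx?]; rw [if_pos (by omega)]; simp
    have hg0 : PySem.List.pyGetD (h :: w :: n :: rest) 0 0 = h := by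
      simp [PySem.List.pyGetD, hget0]
    have hg2 : PySem.List.pyGetD (h :: w :: n :: rest) 2 0 = n := by
      simp [PySem.List.pyGetD, hget2]
    rw [hg0, hg2] at hcond
    show acm (h :: w :: n :: rest) = acm_alt (h :: w :: n :: rest)
    unfold acm acm_alt
    rw [hget0, hget1, hget2]
    by_cases hle : n ≤ h
    · simp only [if_pos hle]
      rw [acmLoop]
      simp only [dif_neg (not_lt.mpr hle)]
      rfl
    · simp only [if_neg hle]
      have hh : 0 < h := by
        rcases hcond with hc | hc
        · exact absurd hc hle
        · exact hc
      rw [acm_loop_closed h hh (n - h).toNat n 1 le_rfl (lt_of_not_ge hle)]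
      set q := PySem.Int.floordiv (n - 1) h
      show acmOut (n - q * h) (1 + q) = acmAltOut (n - (q + 1 - 1) * h) (q + 1)
      have e1 : n - (q + 1 - 1) * h = n - q * h := by ring
      have e2 : (1 : Int) + q = q + 1 := by ring
      rw [e1, e2]
      rfl
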